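-- pv_equiv track=rewrite | github.com/exul/semesterarbeit | lib/winwin/euler.py | merge_cycles
-- ===== SOURCE A (Python) =====
-- def merge_cycles(euler, euler_sub, current_node):
--     '''
--     Merge two eulerian cycles.
--
--     @type   euler: list
--     @param  euler: List that contains the eulerian path.
--     @type   euler_sub: list
--     @param  euler_sub: List that should be merged into eulerian path.
--     @type   current_node: node
--     @param  current_node: Node at which the two lists should be murged
--
--     @rtype: list
--     @return: A list containing all nodes.
--     '''
--
--     # if euler list is empty, merging euler_sub into euler = euler_sub
--     if len(euler) == 0:
--         return euler_sub
--
--     # copy content of euler list to euler_tmp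
--     euler_tmp = list()
--     euler_tmp += euler
--     # empty euler list
--     euler = list()
--     # only append list once
--     found = False
--
--     for node in euler_tmp:
--         if node == current_node and found == False:
--             for node_sub in euler_sub:
--                 euler.append(node_sub)
--             found = True
--         else:
--             euler.append(node)
--
--     return euler
-- ===== SOURCE B (Python) =====
-- def merge_cycles(euler, euler_sub, current_node):
--     # Locate-then-slice re-implementation: splice euler_sub in place of the
--     # first occurrence of current_node; empty euler -> euler_sub, missing
--     # node -> a copy of euler.
--     if len(euler) == 0:
--         return euler_sub
--     if current_node not in euler:
--         return list(euler)
--     i = euler.index(current_node)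
--     return euler[:i] + euler_sub + euler[i+1:]
-- ===== Notes on version B (the rewrite author's own statement) =====
-- stated objective: idiomatic
-- what changed: Replaces A's copy-then-rebuild loop with a flag by a single index lookup and slice concatenation (locate-then-splice).
import Mathlib
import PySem

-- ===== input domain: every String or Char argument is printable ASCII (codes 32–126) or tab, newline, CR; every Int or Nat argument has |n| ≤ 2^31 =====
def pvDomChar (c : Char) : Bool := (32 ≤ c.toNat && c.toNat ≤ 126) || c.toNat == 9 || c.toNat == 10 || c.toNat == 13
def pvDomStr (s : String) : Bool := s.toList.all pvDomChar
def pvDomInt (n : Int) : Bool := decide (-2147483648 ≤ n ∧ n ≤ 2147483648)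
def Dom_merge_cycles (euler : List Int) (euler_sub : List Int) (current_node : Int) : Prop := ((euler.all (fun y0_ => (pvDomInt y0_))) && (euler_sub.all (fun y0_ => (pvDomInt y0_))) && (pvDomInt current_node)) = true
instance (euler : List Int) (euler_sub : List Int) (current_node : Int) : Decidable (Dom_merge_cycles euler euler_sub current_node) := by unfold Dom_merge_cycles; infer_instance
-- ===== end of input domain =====

-- B replaces A's copy-then-rebuild loop by an index lookup plus slice concatenation (idiomatic).


-- ===== PORT A =====
-- loop body: 'if node == current_node and found == False: append euler_sub; found=True else: append node'
def mcStep (euler_sub : List Int) (current_node : Int) (st : List Int × Bool) (node : Int) : List Int × Bool :=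
  if node == current_node && st.2 == false then (st.1 ++ euler_sub, true)
  else (st.1 ++ [node], st.2)

def merge_cycles (euler : List Int) (euler_sub : List Int) (current_node : Int) : List Int :=
  if euler.length == 0 then euler_sub
  else (euler.foldl (mcStep euler_sub current_node) ([], false)).1

-- ===== PORT B =====
-- euler[:i] / euler[i+1:] ported as take/drop: exact for 0 ≤ i ≤ len(euler), which index gives
def merge_cycles_alt (euler : List Int) (euler_sub : List Int) (current_node : Int) : List Int :=
  if euler.length == 0 then euler_sub
  else
    match PySem.List.index? euler current_node with
    | none => euler
    | some i => euler.take i ++ euler_sub ++ euler.drop (i + 1)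

-- ===== PRECONDITION & SPEC =====
def Spec_merge_cycles (euler : List Int) (euler_sub : List Int) (current_node : Int) (out : List Int) : Prop := out = merge_cycles_alt euler euler_sub current_node
instance (euler : List Int) (euler_sub : List Int) (current_node : Int) (out : List Int) : Decidable (Spec_merge_cycles euler euler_sub current_node out) := by unfold Spec_merge_cycles; infer_instance

-- ===== CLAIM (what is proved, stated in full; the proofs are below) =====
def Claim_equal_merge_cycles : Prop := ∀ (euler : List Int) (euler_sub : List Int) (current_node : Int), Dom_merge_cycles euler euler_sub current_node → Spec_merge_cycles euler euler_sub current_node (merge_cycles euler euler_sub current_node)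

-- ===== LEMMAS AND PROOFS =====

-- once found = true, the loop just copies the remaining nodes
theorem mcLoop_true (euler_sub : List Int) (current_node : Int) :
    ∀ (xs acc : List Int),
      xs.foldl (mcStep euler_sub current_node) (acc, true) = (acc ++ xs, true) := by
  intro xs
  induction xs with
  | nil => intro acc; simp
  | cons x xs ih =>
      intro acc
      simp only [List.foldl_cons, mcStep]
      norm_num
      rw [ih]
      simp
theorem mcLoop_false (euler_sub : List Int) (current_node : Int) :
    ∀ (xs acc : List Int),
      (xs.foldl (mcStep euler_sub current_node) (acc, false)).1 =
        match PySem.List.index? xs current_node with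
        | none => acc ++ xs
        | some i => acc ++ (xs.take i ++ euler_sub ++ xs.drop (i + 1)) := by
  intro xs
  induction xs with
  | nil => intro acc; simp [PySem.List.index?]
  | cons x xs ih =>
      intro acc
      by_cases hx : x = current_node
      · subst hx
        simp only [List.foldl_cons, mcStep]
        norm_num
        rw [mcLoop_true]
        simp [List.idxOf?_cons]
      · have hne : (x == current_node) = false := by simp [hx]
        simp only [List.foldl_cons, mcStep, hne]
        norm_num
        rw [ih]
        simp only [PySem.List.index?_eq_idxOf?, List.idxOf?_cons, hne]
        cases List.idxOf? current_node xs with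
        | none => simp
        | some i => simp

-- ===== VERDICT (by name: the statement is the Claim_ definition above) =====
theorem merge_cycles_spec : Claim_equal_merge_cycles := by
  intro euler euler_sub current_node _
  unfold Spec_merge_cycles merge_cycles merge_cycles_alt
  cases euler with
  | nil => simp
  | cons x xs =>
      simp only [List.length_cons]
      norm_num
      have h := mcLoop_false euler_sub current_node (x :: xs) []
      simp only [List.foldl_cons] at h
      rw [h]
      simp only [PySem.List.index?_eq_idxOf?]
      cases List.idxOf? current_node (x :: xs) with
      | none => simp
      | some i => simp
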